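-- pv_equiv track=rewrite | github.com/GeirOwe/adventOfCode | day2_2_2024.py | allDecreasing
-- ===== SOURCE A (Python) =====
-- def allDecreasing(nums):
--     def is_decreasing(arr):
--         return all(arr[i] > arr[i+1] for i in range(len(arr) - 1))
--
--     # Check if the original list is decreasing
--     if is_decreasing(nums):
--         return True
--
--     # Try removing one number at a time
--     for i in range(len(nums)):
--         temp = nums[:i] + nums[i+1:]
--         if is_decreasing(temp):
--             return True
--
--     return False
-- ===== SOURCE B (Python) =====
-- def allDecreasing(nums):
--     # O(n): locate the first adjacent violation; only deleting one of its two
--     # elements can possibly repair the sequence.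
--     def dec(arr):
--         return all(a > b for a, b in zip(arr, arr[1:]))
--     i = next((k for k in range(len(nums) - 1) if nums[k] <= nums[k + 1]), None)
--     if i is None:
--         return True
--     return dec(nums[:i] + nums[i+1:]) or dec(nums[:i+1] + nums[i+2:])
-- ===== Notes on version B (the rewrite author's own statement) =====
-- stated objective: faster
-- what changed: Instead of retrying a full O(n) decreasing-check after deleting every index, B finds the first adjacent violation in one pass and only checks deletion of its two indices, since deleting any other index leaves that violating pair adjacent.
import Mathlib
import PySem

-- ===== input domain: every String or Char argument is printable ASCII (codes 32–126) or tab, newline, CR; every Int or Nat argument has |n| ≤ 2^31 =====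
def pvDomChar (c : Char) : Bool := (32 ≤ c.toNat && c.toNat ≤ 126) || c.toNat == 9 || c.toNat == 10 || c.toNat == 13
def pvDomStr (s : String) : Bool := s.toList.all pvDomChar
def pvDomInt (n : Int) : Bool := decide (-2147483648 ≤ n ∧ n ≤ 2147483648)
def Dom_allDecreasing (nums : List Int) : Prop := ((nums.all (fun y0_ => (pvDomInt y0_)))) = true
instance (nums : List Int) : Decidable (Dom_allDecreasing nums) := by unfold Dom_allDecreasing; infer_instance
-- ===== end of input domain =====

-- B replaces A's O(n^2) "try deleting every index" scan by an O(n) check that only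
-- tries deleting the two indices of the first adjacent violation.

-- ===== PORT A =====
-- is_decreasing(arr): all(arr[i] > arr[i+1] for i in range(len(arr)-1)); both indices are in range for every i produced
def aIsDec (arr : List Int) : Bool :=
  (PySem.List.pyRange 0 ((arr.length : Int) - 1) 1).all fun i =>
    decide (PySem.List.pyGetD arr i 0 > PySem.List.pyGetD arr (i + 1) 0)

def allDecreasing (nums : List Int) : Bool :=
  if aIsDec nums then true
  else
    -- for i in range(len(nums)): temp = nums[:i] + nums[i+1:]; if is_decreasing(temp): return True
    (PySem.List.pyRange 0 (nums.length : Int) 1).any fun i =>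
      aIsDec (PySem.List.slice nums none (some i) ++ PySem.List.slice nums (some (i + 1)) none)

-- ===== PORT B =====
-- dec(arr): all(a > b for a, b in zip(arr, arr[1:]))
def bDec (arr : List Int) : Bool := (arr.zip arr.tail).all fun p => decide (p.1 > p.2)

-- i = next((k for k in range(len(nums)-1) if nums[k] <= nums[k+1]), None): first adjacent violation
def bViol : List Int → Option Nat
  | a :: b :: t => if a ≤ b then some 0 else (bViol (b :: t)).map (· + 1)
  | _ => none

-- the slices nums[:i]+nums[i+1:] and nums[:i+1]+nums[i+2:] with 0 ≤ i are exactly take/drop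
def allDecreasing_alt (nums : List Int) : Bool :=
  match bViol nums with
  | none => true
  | some i => bDec (nums.take i ++ nums.drop (i + 1)) || bDec (nums.take (i + 1) ++ nums.drop (i + 2))

-- ===== PRECONDITION & SPEC =====
def Spec_allDecreasing (nums : List Int) (out : Bool) : Prop := out = allDecreasing_alt nums
instance (nums : List Int) (out : Bool) : Decidable (Spec_allDecreasing nums out) := by unfold Spec_allDecreasing; infer_instance

-- ===== CLAIM (what is proved, stated in full; the proofs are below) =====
def Claim_equal_allDecreasing : Prop := ∀ (nums : List Int), Dom_allDecreasing nums → Spec_allDecreasing nums (allDecreasing nums)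

-- ===== LEMMAS AND PROOFS =====

-- "strictly decreasing" at the level of adjacent getD-indices
def DecP (arr : List Int) : Prop := ∀ k : Nat, k + 1 < arr.length → arr.getD k 0 > arr.getD (k + 1) 0

lemma bDec_iff (arr : List Int) : bDec arr = true ↔ DecP arr := by
  induction arr with
  | nil => simp [bDec, DecP]
  | cons a t ih =>
    cases t with
    | nil => simp [bDec, DecP]
    | cons b t2 =>
      simp only [bDec, List.tail_cons, List.zip_cons_cons, List.all_cons, Bool.and_eq_true,
        decide_eq_true_eq] at *
      constructor
      · rintro ⟨hab, h⟩ k hk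
        cases k with
        | zero => simpa using hab
        | succ k =>
          have := (ih.mp h) k (by simpa using hk)
          simpa using this
      · intro h
        refine ⟨by simpa using h 0 (by simp), ih.mpr ?_⟩
        intro k hk
        have := h (k+1) (by simpa using hk)
        simpa using this

lemma bViol_none_iff (arr : List Int) : bViol arr = none ↔ DecP arr := by
  induction arr with
  | nil => simp [bViol, DecP]
  | cons a t ih =>
    cases t with
    | nil => simp [bViol, DecP]
    | cons b t2 =>
      simp only [bViol] at *
      constructor
      · intro h k hk
        split at h
        · simp at h
        · rw [Option.map_eq_none_iff] at h
          cases k with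
          | zero => simp; omega
          | succ k =>
            have := (ih.mp h) k (by simpa using hk)
            simpa using this
      · intro h
        have hab : ¬ a ≤ b := by have := h 0 (by simp); simp at this; omega
        simp [hab]
        exact ih.mpr (fun k hk => by simpa using h (k+1) (by simpa using hk))

lemma bViol_some (arr : List Int) (i : Nat) (h : bViol arr = some i) :
    i + 1 < arr.length ∧ arr.getD i 0 ≤ arr.getD (i + 1) 0 := by
  induction arr generalizing i with
  | nil => simp [bViol] at h
  | cons a t ih =>
    cases t with
    | nil => simp [bViol] at h
    | cons b t2 =>
      simp only [bViol] at h
      split at h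
      · simp at h; subst h; simpa
      · simp only [Option.map_eq_some_iff] at h
        obtain ⟨j, hj, rfl⟩ := h
        have := ih j hj
        constructor
        · simpa using this.1
        · simpa using this.2

lemma aIsDec_iff (arr : List Int) : aIsDec arr = true ↔ DecP arr := by
  unfold aIsDec
  rw [List.all_eq_true]
  constructor
  · intro h k hk
    have hm : (k : Int) ∈ PySem.List.pyRange 0 ((arr.length : Int) - 1) 1 := by
      rw [PySem.List.mem_pyRange_one]; omega
    have := h _ hm
    simp only [decide_eq_true_eq] at this
    have e1 : PySem.List.pyGetD arr (k : Int) 0 = arr.getD k 0 := PySem.List.pyGetD_natCast arr k 0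
    have e2 : PySem.List.pyGetD arr ((k : Int) + 1) 0 = arr.getD (k+1) 0 := by
      have := PySem.List.pyGetD_natCast arr (k+1) 0
      push_cast at this
      exact this
    rw [e1, e2] at this
    exact this
  · intro h i hi
    rw [PySem.List.mem_pyRange_one] at hi
    obtain ⟨h0, h1⟩ := hi
    have hk : i = ((i.toNat : Nat) : Int) := by omega
    simp only [decide_eq_true_eq]
    rw [hk]
    have e2 : PySem.List.pyGetD arr ((i.toNat : Int) + 1) 0 = arr.getD (i.toNat + 1) 0 := by
      have := PySem.List.pyGetD_natCast arr (i.toNat + 1) 0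
      push_cast at this
      exact this
    rw [PySem.List.pyGetD_natCast, e2]
    exact h i.toNat (by omega)

lemma aIsDec_eq_bDec (arr : List Int) : aIsDec arr = bDec arr := by
  rw [Bool.eq_iff_iff, aIsDec_iff, bDec_iff]

lemma rem_getElem? (nums : List Int) (j p : Nat) (hj : j < nums.length) :
    (nums.take j ++ nums.drop (j + 1))[p]? = if p < j then nums[p]? else nums[p + 1]? := by
  have hlt : (nums.take j).length = j := by simp; omega
  rcases Nat.lt_or_ge p j with h | h
  · rw [List.getElem?_append_left (by omega), if_pos h, List.getElem?_take]
    rw [if_pos h]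
  · rw [List.getElem?_append_right (by omega), if_neg (by omega), List.getElem?_drop]
    congr 1
    omega

-- removing any index other than i or i+1 keeps the violating pair (i, i+1) adjacent
lemma rem_not_dec (nums : List Int) (i j : Nat) (hi : i + 1 < nums.length)
    (hv : nums.getD i 0 ≤ nums.getD (i + 1) 0) (hj : j < nums.length)
    (hji : j ≠ i) (hji1 : j ≠ i + 1) : ¬ DecP (nums.take j ++ nums.drop (j + 1)) := by
  intro h
  have hlen : (nums.take j ++ nums.drop (j + 1)).length = nums.length - 1 := by simp; omega
  have key : ∀ p : Nat, (nums.take j ++ nums.drop (j+1)).getD p 0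
      = if p < j then nums.getD p 0 else nums.getD (p+1) 0 := by
    intro p
    rw [List.getD_eq_getElem?_getD, rem_getElem? nums j p hj]
    split <;> rw [List.getD_eq_getElem?_getD]
  rcases Nat.lt_or_ge j i with hlt | hge
  · have := h (i - 1) (by omega)
    rw [key, key] at this
    have e : i - 1 + 1 = i := by omega
    rw [if_neg (by omega), if_neg (by omega), e] at this
    omega
  · have hgt : i + 1 < j := by omega
    have := h i (by omega)
    rw [key, key] at this
    rw [if_pos (by omega), if_pos (by omega)] at this
    omega

lemma slice_eq_takeDrop (nums : List Int) (j : Int) (h0 : 0 ≤ j) :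
    PySem.List.slice nums none (some j) ++ PySem.List.slice nums (some (j + 1)) none
      = nums.take j.toNat ++ nums.drop (j.toNat + 1) := by
  rw [PySem.List.slice_to nums h0, PySem.List.slice_from nums (a := j + 1) (by omega)]
  congr 2
  omega

theorem allDecreasing_eq (nums : List Int) : allDecreasing nums = allDecreasing_alt nums := by
  unfold allDecreasing allDecreasing_alt
  cases hV : bViol nums with
  | none =>
    rw [if_pos ((aIsDec_iff nums).mpr ((bViol_none_iff nums).mp hV))]
  | some i =>
    obtain ⟨hi, hv⟩ := bViol_some nums i hV
    have hnd : ¬ DecP nums := by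
      intro h
      have := h i hi
      omega
    rw [if_neg (fun hc => hnd ((aIsDec_iff nums).mp hc))]
    rw [Bool.eq_iff_iff, List.any_eq_true, Bool.or_eq_true]
    constructor
    · rintro ⟨j, hm, hd⟩
      rw [PySem.List.mem_pyRange_one] at hm
      obtain ⟨k, rfl⟩ : ∃ k : Nat, j = (k : Int) := ⟨j.toNat, by omega⟩
      rw [slice_eq_takeDrop nums k hm.1, Int.toNat_natCast] at hd
      rw [aIsDec_eq_bDec] at hd
      have hkn : k < nums.length := by omega
      rcases eq_or_ne k i with rfl | hne
      · exact Or.inl hd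
      rcases eq_or_ne k (i + 1) with rfl | hne1
      · exact Or.inr hd
      · exact absurd ((bDec_iff _).mp hd) (rem_not_dec nums i k hi hv hkn hne hne1)
    · intro h
      rcases h with hd | hd
      · refine ⟨(i : Int), by rw [PySem.List.mem_pyRange_one]; omega, ?_⟩
        rw [slice_eq_takeDrop nums i (by omega), Int.toNat_natCast, aIsDec_eq_bDec]
        exact hd
      · refine ⟨((i + 1 : Nat) : Int), by rw [PySem.List.mem_pyRange_one]; push_cast; omega, ?_⟩
        rw [slice_eq_takeDrop nums _ (by omega), Int.toNat_natCast, aIsDec_eq_bDec]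
        exact hd

-- ===== VERDICT (by name: the statement is the Claim_ definition above) =====
theorem allDecreasing_spec : Claim_equal_allDecreasing := by
  intro nums _
  unfold Spec_allDecreasing
  exact allDecreasing_eq nums
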